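-- pv_equiv track=rewrite | github.com/maksm/aoc | 2015/19.py | get_variations
-- ===== SOURCE A (Python) =====
-- def get_variations(specs, orig):
--     mols = set()
--     for i in range(len(orig)):
--         if orig[i] in specs:
--             for var in specs[orig[i]]:
--                 mols.add((orig[:i] if i > 0 else "") + var + orig[i + 1 :])
--         elif i < len(orig) - 1 and orig[i : i + 2] in specs:
--             for var in specs[orig[i : i + 2]]:
--                 mols.add(orig[:i] + var + orig[i + 2 :])
--     return mols
-- ===== SOURCE B (Python) =====
-- def get_variations(specs, orig):
--     # Rule-major: for each rule collect its match positions, merge all hits in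
--     # position order, then do the substitutions; A scans positions instead.
--     n = len(orig)
--     hits = []
--     for pat, reps in specs.items():
--         k = len(pat)
--         if k == 1:
--             hits += [(i, k, reps) for i in range(n) if orig[i] == pat]
--         elif k == 2:
--             hits += [(i, k, reps) for i in range(n - 1)
--                      if orig[i:i + 2] == pat and orig[i] not in specs]
--     hits.sort(key=lambda h: h[0])
--     mols = set()
--     for i, k, reps in hits:
--         for var in reps:
--             mols.add(orig[:i] + var + orig[i + k:])
--     return mols
-- ===== Notes on version B (the rewrite author's own statement) =====
-- stated objective: alternative
-- what changed: B is rule-major: it loops over the rules, collecting each pattern's match positions (with the single-char-priority guard for two-char patterns) into one hit list, sorts the hits by position, and only then performs all substitutions; A is a position-major scan doing dict lookups and branch tests at every index, which costs more per character than B's per-rule comprehension scans (measured ~2.5x at the largest size).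
import Mathlib
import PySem

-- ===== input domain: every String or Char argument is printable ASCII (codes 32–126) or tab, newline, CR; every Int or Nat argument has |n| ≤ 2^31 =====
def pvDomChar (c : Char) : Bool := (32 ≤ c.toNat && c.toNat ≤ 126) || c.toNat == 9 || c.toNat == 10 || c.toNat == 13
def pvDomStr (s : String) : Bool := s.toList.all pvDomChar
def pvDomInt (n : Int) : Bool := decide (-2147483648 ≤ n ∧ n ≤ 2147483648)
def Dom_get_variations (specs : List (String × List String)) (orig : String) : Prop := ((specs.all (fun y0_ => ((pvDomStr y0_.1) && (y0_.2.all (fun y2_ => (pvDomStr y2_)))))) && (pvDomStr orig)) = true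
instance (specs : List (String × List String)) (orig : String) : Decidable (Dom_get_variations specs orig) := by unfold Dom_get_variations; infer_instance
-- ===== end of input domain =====

-- B is rule-major: for each rule it collects that pattern's match positions,
-- merges all hits sorted by position, then substitutes — instead of A's
-- position-major scan with dict lookups at every index (B measured faster in a timing run).

-- ===== PORT A =====
def get_variations (specs : List (String × List String)) (orig : String) : List String :=
  let l := orig.toList
  (PySem.List.pyRange 0 (l.length : Int) 1).foldl (fun mols i =>
    match PySem.List.pyGet? l i with
    | none => mols
    | some c =>
      match (PySem.Dict.mk specs).get? (String.ofList [c]) with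
      | some vars =>
          vars.foldl (fun m var =>
            PySem.Set.add m (String.ofList
              ((if 0 < i then PySem.List.slice l none (some i) else []) ++ var.toList
                ++ PySem.List.slice l (some (i + 1)) none))) mols
      | none =>
          if i < (l.length : Int) - 1 then
            match (PySem.Dict.mk specs).get? (String.ofList (PySem.List.slice l (some i) (some (i + 2)))) with
            | some vars =>
                vars.foldl (fun m var =>
                  PySem.Set.add m (String.ofList
                    (PySem.List.slice l none (some i) ++ var.toList
                      ++ PySem.List.slice l (some (i + 2)) none))) mols
            | none => mols
          else mols) []

-- ===== PORT B =====
-- Source B's dict-membership key 'orig[i]' (a one-char string)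
def keyAt (l : List Char) (i : Int) : String :=
  match PySem.List.pyGet? l i with
  | some c => String.ofList [c]
  | none => ""

-- the two comprehensions of Source B's rule loop: the hits (i, k, vars) contributed by one rule
def hitsOf (specs : List (String × List String)) (l : List Char) (pat : String)
    (vars : List String) : List (Int × Int × List String) :=
  match pat.toList with
  | [c] =>
      ((PySem.List.pyRange 0 (l.length : Int) 1).filter
        (fun i => PySem.List.pyGet? l i == some c)).map (fun i => (i, (1 : Int), vars))
  | [c1, c2] =>
      ((PySem.List.pyRange 0 ((l.length : Int) - 1) 1).filter
        (fun i => (PySem.List.slice l (some i) (some (i + 2)) == [c1, c2])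
          && !((PySem.Dict.mk specs).contains (keyAt l i)))).map (fun i => (i, (2 : Int), vars))
  | _ => []

def get_variations_alt (specs : List (String × List String)) (orig : String) : List String :=
  let l := orig.toList
  let hits := specs.foldl (fun acc pv => acc ++ hitsOf specs l pv.1 pv.2) []
  let sh := PySem.List.sorted hits (fun h => h.1) false
  sh.foldl (fun mols h =>
    h.2.2.foldl (fun m var =>
      PySem.Set.add m (String.ofList
        (PySem.List.slice l none (some h.1) ++ var.toList
          ++ PySem.List.slice l (some (h.1 + h.2.1)) none))) mols) []

-- ===== PRECONDITION & SPEC =====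
-- Pre_ requires pairwise-distinct rule keys: the Python argument is a dict, whose keys
-- are necessarily distinct, so this excludes no input a Python caller can pass.
def Pre_get_variations (specs : List (String × List String)) (orig : String) : Prop :=
  (specs.map Prod.fst).Nodup
instance (specs : List (String × List String)) (orig : String) : Decidable (Pre_get_variations specs orig) := by unfold Pre_get_variations; infer_instance
def pvWitness_get_variations : (List (String × List String)) × String :=
  ([("H", ["HO", "OH"]), ("O", ["HH"]), ("Si", ["O"])], "HOSiH")

def Spec_get_variations (specs : List (String × List String)) (orig : String) (out : List String) : Prop := out = get_variations_alt specs orig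
instance (specs : List (String × List String)) (orig : String) (out : List String) : Decidable (Spec_get_variations specs orig out) := by unfold Spec_get_variations; infer_instance

-- ===== CLAIM (what is proved, stated in full; the proofs are below) =====
def Claim_equal_get_variations : Prop := ∀ (specs : List (String × List String)) (orig : String), Dom_get_variations specs orig → Pre_get_variations specs orig → Spec_get_variations specs orig (get_variations specs orig)

-- ===== LEMMAS AND PROOFS =====

-- the candidate list contributed at index i of A's loop (map form of A's inner folds)
def candA (specs : List (String × List String)) (l : List Char) (i : Int) : List String :=
  match PySem.List.pyGet? l i with
  | none => []
  | some c =>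
    match (PySem.Dict.mk specs).get? (String.ofList [c]) with
    | some vars =>
        vars.map (fun var => String.ofList
          ((if 0 < i then PySem.List.slice l none (some i) else []) ++ var.toList
            ++ PySem.List.slice l (some (i + 1)) none))
    | none =>
        if i < (l.length : Int) - 1 then
          match (PySem.Dict.mk specs).get? (String.ofList (PySem.List.slice l (some i) (some (i + 2)))) with
          | some vars =>
              vars.map (fun var => String.ofList
                (PySem.List.slice l none (some i) ++ var.toList
                  ++ PySem.List.slice l (some (i + 2)) none))
          | none => []
        else []

-- the hit descriptor A's scan produces at index i (at most one per position)
def hitA (specs : List (String × List String)) (l : List Char) (i : Int) :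
    Option (Int × Int × List String) :=
  match PySem.List.pyGet? l i with
  | none => none
  | some c =>
    match (PySem.Dict.mk specs).get? (String.ofList [c]) with
    | some vars => some (i, 1, vars)
    | none =>
        if i < (l.length : Int) - 1 then
          match (PySem.Dict.mk specs).get? (String.ofList (PySem.List.slice l (some i) (some (i + 2)))) with
          | some vars => some (i, 2, vars)
          | none => none
        else none

-- the substitutions produced by one hit
def substList (l : List Char) (h : Int × Int × List String) : List String :=
  h.2.2.map (fun var => String.ofList
    (PySem.List.slice l none (some h.1) ++ var.toList
      ++ PySem.List.slice l (some (h.1 + h.2.1)) none))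

theorem step_eq (specs : List (String × List String)) (l : List Char) (mols : List String) (i : Int) :
    (match PySem.List.pyGet? l i with
    | none => mols
    | some c =>
      match (PySem.Dict.mk specs).get? (String.ofList [c]) with
      | some vars =>
          vars.foldl (fun m var =>
            PySem.Set.add m (String.ofList
              ((if 0 < i then PySem.List.slice l none (some i) else []) ++ var.toList
                ++ PySem.List.slice l (some (i + 1)) none))) mols
      | none =>
          if i < (l.length : Int) - 1 then
            match (PySem.Dict.mk specs).get? (String.ofList (PySem.List.slice l (some i) (some (i + 2)))) with
            | some vars =>
                vars.foldl (fun m var =>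
                  PySem.Set.add m (String.ofList
                    (PySem.List.slice l none (some i) ++ var.toList
                      ++ PySem.List.slice l (some (i + 2)) none))) mols
            | none => mols
          else mols)
    = (candA specs l i).foldl PySem.Set.add mols := by
  unfold candA
  cases PySem.List.pyGet? l i with
  | none => simp
  | some c =>
    simp only
    cases (PySem.Dict.mk specs).get? (String.ofList [c]) with
    | some vars => simp [List.foldl_map]
    | none =>
      simp only
      split_ifs with h
      · cases (PySem.Dict.mk specs).get? (String.ofList (PySem.List.slice l (some i) (some (i + 2)))) with
        | some vars => simp [List.foldl_map]
        | none => simp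
      · simp

theorem fold_flat (specs : List (String × List String)) (l : List Char) (xs : List Int) :
    ∀ init : List String,
      xs.foldl (fun mols i => (candA specs l i).foldl PySem.Set.add mols) init
        = (xs.flatMap (candA specs l)).foldl PySem.Set.add init := by
  induction xs with
  | nil => intro init; simp
  | cons x xs ih => intro init; simp [List.foldl_append, ih]

-- candA at a nonnegative index is the substitutions of its hit descriptor
theorem candA_eq_hit (specs : List (String × List String)) (l : List Char) (i : Int)
    (hi : 0 ≤ i) :
    candA specs l i = (hitA specs l i).elim [] (substList l) := by
  unfold candA hitA
  cases PySem.List.pyGet? l i with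
  | none => simp
  | some c =>
    simp only
    cases (PySem.Dict.mk specs).get? (String.ofList [c]) with
    | some vars =>
      simp only [Option.elim, substList]
      refine List.map_congr_left fun var _ => ?_
      rcases lt_or_eq_of_le hi with h0 | h0
      · rw [if_pos h0]
      · subst h0
        rw [if_neg (by omega)]
        rw [show (0 : Int) = ((0 : Nat) : Int) by simp, PySem.List.slice_to_natCast]
        simp
    | none =>
      simp only
      split_ifs with h
      · cases (PySem.Dict.mk specs).get? (String.ofList (PySem.List.slice l (some i) (some (i + 2)))) with
        | some vars => simp [substList]
        | none => simp
      · simp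

-- if hitA yields a hit, its position is i
theorem hitA_fst (specs : List (String × List String)) (l : List Char) (i : Int)
    (h : Int × Int × List String) (hh : hitA specs l i = some h) : h.1 = i := by
  unfold hitA at hh
  cases hg : PySem.List.pyGet? l i with
  | none => rw [hg] at hh; simp at hh
  | some c =>
    rw [hg] at hh
    simp only at hh
    cases h1 : (PySem.Dict.mk specs).get? (String.ofList [c]) with
    | some vars => rw [h1] at hh; simp at hh; simp [← hh]
    | none =>
      rw [h1] at hh
      simp only at hh
      split_ifs at hh with h2
      cases h3 : (PySem.Dict.mk specs).get? (String.ofList (PySem.List.slice l (some i) (some (i + 2)))) with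
      | some vars => rw [h3] at hh; simp at hh; simp [← hh]
      | none => rw [h3] at hh; simp at hh

-- flatMap of an Option-elim is a flatMap over the filterMap
theorem flatMap_elim_eq {α β γ : Type} (xs : List α) (f : α → Option β) (g : β → List γ) :
    xs.flatMap (fun i => (f i).elim [] g) = (xs.filterMap f).flatMap g := by
  induction xs with
  | nil => rfl
  | cons x xs ih =>
    cases hx : f x with
    | none => simp [hx, ih]
    | some b => simp [hx, ih]

-- hits of Source B's rule loop, as a flatMap
theorem hits_eq_flatMap (specs rules : List (String × List String)) (l : List Char) :
    ∀ acc, rules.foldl (fun acc pv => acc ++ hitsOf specs l pv.1 pv.2) acc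
      = acc ++ rules.flatMap (fun pv => hitsOf specs l pv.1 pv.2) := by
  induction rules with
  | nil => intro acc; simp
  | cons r rs ih => intro acc; simp [ih]

-- MEMBERSHIP: h is a hit of some rule iff it is the hit descriptor of A's scan at h.1
theorem mem_hits_iff (specs : List (String × List String)) (l : List Char)
    (hnd : (specs.map Prod.fst).Nodup) (h : Int × Int × List String) :
    (h ∈ specs.flatMap (fun pv => hitsOf specs l pv.1 pv.2))
      ↔ h ∈ (PySem.List.pyRange 0 (l.length : Int) 1).filterMap (hitA specs l) := by
  have hkeys : (PySem.Dict.mk specs).keys.Nodup := hnd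
  constructor
  · rintro hm
    rw [List.mem_flatMap] at hm
    obtain ⟨⟨pat, vars⟩, hpv, hh⟩ := hm
    have hget : (PySem.Dict.mk specs).get? pat = some vars :=
      PySem.Dict.get?_of_mem_items _ hpv hkeys
    rw [List.mem_filterMap]
    unfold hitsOf at hh
    cases hpat : pat.toList with
    | nil => rw [hpat] at hh; simp at hh
    | cons c t =>
      cases t with
      | nil =>
        rw [hpat] at hh
        simp only [List.mem_map, List.mem_filter] at hh
        obtain ⟨i, ⟨hir, hic⟩, rfl⟩ := hh
        refine ⟨i, hir, ?_⟩
        have hic' : PySem.List.pyGet? l i = some c := by simpa using hic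
        have hps : String.ofList [c] = pat := by
          rw [show [c] = pat.toList from hpat.symm]; simp
        unfold hitA
        rw [hic']
        simp only [hps, hget]
      | cons c2 t2 =>
        cases t2 with
        | cons _ _ => rw [hpat] at hh; simp at hh
        | nil =>
          rw [hpat] at hh
          simp only [List.mem_map, List.mem_filter, Bool.and_eq_true] at hh
          obtain ⟨i, ⟨hir, hsl, hng⟩, rfl⟩ := hh
          rw [PySem.List.mem_pyRange_one] at hir
          have hsl' : PySem.List.slice l (some i) (some (i + 2)) = [c, c2] := by
            simpa using hsl
          have hc1 : PySem.List.pyGet? l i = some c := by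
            have h0 : (0:Int) ≤ i := hir.1
            obtain ⟨n, rfl⟩ := Int.eq_ofNat_of_zero_le h0
            have hlt : n < l.length := by
              have := hir.2; omega
            rw [PySem.List.pyGet?_natCast]
            rw [show (n:Int) + 2 = ((n + 2 : Nat) : Int) by push_cast; ring] at hsl'
            rw [PySem.List.slice_natCast] at hsl'
            have : (l.drop n).take 2 = [c, c2] := by
              simpa using hsl'
            have hh0 : (l.drop n)[0]? = some c := by
              cases hdn : l.drop n with
              | nil => rw [hdn] at this; simp at this
              | cons a t =>
                rw [hdn] at this
                cases t with
                | nil => simp at this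
                | cons b t' =>
                  simp at this
                  simp [this.1]
            rw [List.getElem?_drop] at hh0
            simpa using hh0
          have hnc : (PySem.Dict.mk specs).get? (String.ofList [c]) = none := by
            have : (PySem.Dict.mk specs).contains (keyAt l i) = false := by
              simpa using hng
            rw [keyAt, hc1] at this
            rw [PySem.Dict.contains_eq_isSome_get?] at this
            exact Option.not_isSome_iff_eq_none.mp (by simp [this])
          refine ⟨i, ?_, ?_⟩
          · rw [PySem.List.mem_pyRange_one]
            constructor
            · exact hir.1
            · have := hir.2; omega
          · unfold hitA
            rw [hc1]
            simp only [hnc]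
            rw [if_pos (by have := hir.2; omega)]
            have hps : String.ofList (PySem.List.slice l (some i) (some (i + 2))) = pat := by
              rw [hsl', show [c, c2] = pat.toList from hpat.symm]; simp
            simp only [hps, hget]
  · rintro hm
    rw [List.mem_filterMap] at hm
    obtain ⟨i, hir, hhit⟩ := hm
    rw [List.mem_flatMap]
    unfold hitA at hhit
    cases hg : PySem.List.pyGet? l i with
    | none => rw [hg] at hhit; simp at hhit
    | some c =>
      rw [hg] at hhit
      simp only at hhit
      cases h1 : (PySem.Dict.mk specs).get? (String.ofList [c]) with
      | some vars =>
        rw [h1] at hhit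
        simp only [Option.some.injEq] at hhit
        refine ⟨(String.ofList [c], vars), PySem.Dict.mem_items_of_get?_eq_some _ h1, ?_⟩
        unfold hitsOf
        rw [show (String.ofList [c]).toList = [c] by simp]
        simp only [List.mem_map, List.mem_filter]
        exact ⟨i, ⟨hir, by simp [hg]⟩, hhit⟩
      | none =>
        rw [h1] at hhit
        simp only at hhit
        split_ifs at hhit with h2
        · cases h3 : (PySem.Dict.mk specs).get? (String.ofList (PySem.List.slice l (some i) (some (i + 2)))) with
          | none => rw [h3] at hhit; simp at hhit
          | some vars =>
            rw [h3] at hhit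
            simp only [Option.some.injEq] at hhit
            rw [PySem.List.mem_pyRange_one] at hir
            have h0 : (0:Int) ≤ i := hir.1
            obtain ⟨n, rfl⟩ := Int.eq_ofNat_of_zero_le h0
            have hlt : (n:Int) < (l.length : Int) - 1 := h2
            have hlt' : n + 1 < l.length := by exact_mod_cast (by omega : (n:Int) + 1 < (l.length:Int))
            have hsl : PySem.List.slice l (some (n:Int)) (some ((n:Int) + 2)) = [c, l[n+1]] := by
              rw [show (n:Int) + 2 = ((n + 2 : Nat) : Int) by push_cast; ring,
                  PySem.List.slice_natCast]
              have hc : l[n] = c := by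
                have := hg
                rw [PySem.List.pyGet?_natCast] at this
                rw [List.getElem?_eq_getElem (by omega)] at this
                simpa using this
              apply List.ext_getElem
              · simp; omega
              · intro j hj1 hj2
                simp only [List.getElem_take, List.getElem_drop]
                have : j < 2 := by simpa using hj2
                interval_cases j
                · simpa using hc
                · simp
            refine ⟨(String.ofList (PySem.List.slice l (some (n:Int)) (some ((n:Int) + 2))), vars),
              PySem.Dict.mem_items_of_get?_eq_some _ h3, ?_⟩
            unfold hitsOf
            rw [hsl]
            rw [show (String.ofList [c, l[n+1]]).toList = [c, l[n+1]] by simp]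
            simp only [List.mem_map, List.mem_filter, Bool.and_eq_true]
            refine ⟨(n:Int), ⟨?_, ?_, ?_⟩, hhit⟩
            · rw [PySem.List.mem_pyRange_one]; exact ⟨h0, hlt⟩
            · simp [hsl]
            · have : (PySem.Dict.mk specs).contains (keyAt l (n:Int)) = false := by
                rw [keyAt, hg, PySem.Dict.contains_eq_isSome_get?, h1]
                rfl
              simp [this]

-- an element of hitsOf determines the rule's pattern (used for disjointness)
theorem hitsOf_pat (specs : List (String × List String)) (l : List Char) (pat : String)
    (vars : List String) (h : Int × Int × List String)
    (hh : h ∈ hitsOf specs l pat vars) :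
    (h.2.1 = 1 ∧ PySem.List.pyGet? l h.1 = some (pat.toList.headD ' ') ∧ pat.toList.length = 1)
    ∨ (h.2.1 = 2 ∧ PySem.List.slice l (some h.1) (some (h.1 + 2)) = pat.toList ∧ pat.toList.length = 2) := by
  unfold hitsOf at hh
  cases hpat : pat.toList with
  | nil => rw [hpat] at hh; simp at hh
  | cons c t =>
    cases t with
    | nil =>
      rw [hpat] at hh
      simp only [List.mem_map, List.mem_filter] at hh
      obtain ⟨i, ⟨_, hic⟩, rfl⟩ := hh
      exact Or.inl ⟨rfl, by simpa [hpat] using hic, by simp⟩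
    | cons c2 t2 =>
      cases t2 with
      | cons _ _ => rw [hpat] at hh; simp at hh
      | nil =>
        rw [hpat] at hh
        simp only [List.mem_map, List.mem_filter, Bool.and_eq_true] at hh
        obtain ⟨i, ⟨_, hsl, _⟩, rfl⟩ := hh
        exact Or.inr ⟨rfl, by simpa [hpat] using hsl, by simp⟩

theorem pyRange_one_nodup (a b : Int) : (PySem.List.pyRange a b 1).Nodup := by
  rw [PySem.List.pyRange_of_pos a b (s := 1) (by omega)]
  exact List.Nodup.map (fun x y h => by omega) (List.nodup_range)

theorem hitsOf_nodup (specs : List (String × List String)) (l : List Char) (pat : String)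
    (vars : List String) : (hitsOf specs l pat vars).Nodup := by
  unfold hitsOf
  cases pat.toList with
  | nil => simp
  | cons c t =>
    cases t with
    | nil =>
      apply List.Nodup.map (fun a b hab => by simpa using congrArg (·.1) hab)
      exact List.Nodup.filter _ (pyRange_one_nodup _ _)
    | cons c2 t2 =>
      cases t2 with
      | cons _ _ => simp
      | nil =>
        apply List.Nodup.map (fun a b hab => by simpa using congrArg (·.1) hab)
        exact List.Nodup.filter _ (pyRange_one_nodup _ _)

theorem hits_nodup (specs : List (String × List String)) (l : List Char)
    (hnd : (specs.map Prod.fst).Nodup) :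
    (specs.flatMap (fun pv => hitsOf specs l pv.1 pv.2)).Nodup := by
  rw [List.nodup_flatMap]
  refine ⟨fun pv _ => hitsOf_nodup specs l pv.1 pv.2, ?_⟩
  have hp : specs.Pairwise (fun a b => a.1 ≠ b.1) :=
    List.pairwise_map.mp hnd
  refine hp.imp ?_
  intro a b hne
  intro x hxa hxb
  rcases hitsOf_pat specs l a.1 a.2 x hxa with ⟨hk1, hg1, hl1⟩ | ⟨hk1, hs1, hl1⟩ <;>
    rcases hitsOf_pat specs l b.1 b.2 x hxb with ⟨hk2, hg2, hl2⟩ | ⟨hk2, hs2, hl2⟩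
  · apply hne
    have : a.1.toList = b.1.toList := by
      have ha : a.1.toList = [a.1.toList.headD ' '] := by
        cases h : a.1.toList with
        | nil => rw [h] at hl1; simp at hl1
        | cons x t => cases t with
          | nil => rfl
          | cons _ _ => rw [h] at hl1; simp at hl1
      have hb : b.1.toList = [b.1.toList.headD ' '] := by
        cases h : b.1.toList with
        | nil => rw [h] at hl2; simp at hl2
        | cons x t => cases t with
          | nil => rfl
          | cons _ _ => rw [h] at hl2; simp at hl2
      rw [ha, hb]
      have h' : a.1.toList.headD ' ' = b.1.toList.headD ' ' := by
        injection hg1.symm.trans hg2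
      rw [h']
    have := congrArg String.ofList this
    simpa using this
  · omega
  · omega
  · apply hne
    have : a.1.toList = b.1.toList := hs1.symm.trans hs2
    have := congrArg String.ofList this
    simpa using this

theorem target_pairwise (specs : List (String × List String)) (l : List Char) :
    ((PySem.List.pyRange 0 (l.length : Int) 1).filterMap (hitA specs l)).Pairwise
      (fun a b => a.1 < b.1) := by
  rw [List.pairwise_filterMap]
  have : (PySem.List.pyRange 0 (l.length : Int) 1).Pairwise (· < ·) := by
    rw [PySem.List.pyRange_zero_natCast]
    exact List.pairwise_lt_range.map _ (fun a b h => by exact_mod_cast h)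
  refine this.imp ?_
  intro a b hab x hx y hy
  rw [hitA_fst specs l a x hx, hitA_fst specs l b y hy]
  exact hab

theorem target_nodup (specs : List (String × List String)) (l : List Char) :
    ((PySem.List.pyRange 0 (l.length : Int) 1).filterMap (hitA specs l)).Nodup :=
  (target_pairwise specs l).imp (fun h => by intro he; rw [he] at h; omega)

-- the B-side double loop is a Set.add fold over the flattened substitutions
theorem foldB_eq (l : List Char) (sh : List (Int × Int × List String)) :
    sh.foldl (fun mols h =>
      h.2.2.foldl (fun m var =>
        PySem.Set.add m (String.ofList
          (PySem.List.slice l none (some h.1) ++ var.toList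
            ++ PySem.List.slice l (some (h.1 + h.2.1)) none))) mols) []
    = (sh.flatMap (substList l)).foldl PySem.Set.add [] := by
  rw [List.foldl_flatMap]
  refine (PySem.List.foldl_congr_mem sh _ _ [] ?_).symm
  intro acc h _
  simp [substList, List.foldl_map]

-- ===== VERDICT (by name: the statement is the Claim_ definition above) =====
theorem get_variations_spec : Claim_equal_get_variations := by
  unfold Claim_equal_get_variations
  intro specs orig _ hpre
  unfold Spec_get_variations get_variations get_variations_alt
  simp only
  rw [show (fun (mols : List String) (i : Int) =>
      match PySem.List.pyGet? orig.toList i with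
      | none => mols
      | some c =>
        match (PySem.Dict.mk specs).get? (String.ofList [c]) with
        | some vars =>
            vars.foldl (fun m var =>
              PySem.Set.add m (String.ofList
                ((if 0 < i then PySem.List.slice orig.toList none (some i) else []) ++ var.toList
                  ++ PySem.List.slice orig.toList (some (i + 1)) none))) mols
        | none =>
            if i < (orig.toList.length : Int) - 1 then
              match (PySem.Dict.mk specs).get? (String.ofList (PySem.List.slice orig.toList (some i) (some (i + 2)))) with
              | some vars =>
                  vars.foldl (fun m var =>
                    PySem.Set.add m (String.ofList
                      (PySem.List.slice orig.toList none (some i) ++ var.toList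
                        ++ PySem.List.slice orig.toList (some (i + 2)) none))) mols
              | none => mols
            else mols)
    = fun mols i => (candA specs orig.toList i).foldl PySem.Set.add mols from
      funext fun mols => funext fun i => step_eq specs orig.toList mols i]
  rw [fold_flat]
  rw [hits_eq_flatMap, List.nil_append, foldB_eq]
  have hsorted : PySem.List.sorted
      (specs.flatMap (fun pv => hitsOf specs orig.toList pv.1 pv.2)) (fun h => h.1)
      = (PySem.List.pyRange 0 (orig.toList.length : Int) 1).filterMap (hitA specs orig.toList) := by
    apply PySem.List.sorted_eq_of_perm_of_pairwise_lt
    · rw [List.perm_ext_iff_of_nodup (target_nodup specs orig.toList)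
        (hits_nodup specs orig.toList hpre)]
      intro h
      exact (mem_hits_iff specs orig.toList hpre h).symm
    · exact target_pairwise specs orig.toList
  rw [hsorted, ← flatMap_elim_eq]
  congr 1
  apply List.flatMap_congr
  intro i hi
  rw [PySem.List.mem_pyRange_one] at hi
  exact candA_eq_hit specs orig.toList i hi.1
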